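-- pv_equiv track=rewrite | github.com/ccpnmr/analysis | src/python/ccpn/core/lib/MoleculeLib.py | sequenceMatchOffset
-- ===== SOURCE A (Python) =====
-- import typing
-- from collections import OrderedDict
--
-- def sequenceMatchOffset(reference: OrderedDict, sequence: OrderedDict) -> typing.Optional[int]:
--     """Check if residues in sequence match those in reference, directly or with an offset.
--     Reference and sequence are OrderedDict(sequenceCode:residueType)
--     Both integer and string sequenceCodes (or a mixture) will give correct results
--     - other types of key will not.
--
--     Returns 0 if all(reference.get(key) == val for key, val in sequence.items())
--
--     Otherwise tries to convert keys in sequence and reference to integers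
--     and checks if all (reference.get(key+offset) == val for key, val in sequence.items())
--     for some offset.
--
--     Returns the offset is a match is found,, None if no match is found
--     """
--
--     if not reference or not sequence:
--         return None
--
--     if None in reference.values() or None in sequence.values():
--         raise ValueError("Input sequence contained residueType None")
--
--     if all(reference.get(key) == val for key, val in sequence.items()):
--         # matches sequence with zero offset correction
--         return 0
--
--     else:
--         # No luck. Convert to integers and try with an offset
--         try:
--             reference2 = OrderedDict(((int(key), val) for key, val in reference.items()))
--             sequence2 = OrderedDict(((int(key), val) for key, val in sequence.items()))
--         except ValueError:
--             # Could not convert to integer. Failure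
--             return None
--
--         minOffset = min(reference2.keys()) - min(sequence2.keys())
--         maxOffset = max(reference2.keys()) - max(sequence2.keys())
--         for offset in range(minOffset, maxOffset + 1):
--             if all(reference2.get(key + offset) == val for key, val in sequence2.items()):
--                 return offset
--
--         # No offset matched. Result is failure
--         return None
-- ===== SOURCE B (Python) =====
-- import typing
-- from collections import OrderedDict
--
-- def sequenceMatchOffset(reference: OrderedDict, sequence: OrderedDict) -> typing.Optional[int]:
--     """Anchored re-implementation: instead of scanning every offset in
--     [min(ref)-min(seq), max(ref)-max(seq)], index reference positions by residue
--     type and only try offsets that align the first sequence residue onto a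
--     reference residue of the same type, smallest offset first."""
--     if not reference or not sequence:
--         return None
--
--     if None in reference.values() or None in sequence.values():
--         raise ValueError("Input sequence contained residueType None")
--
--     if all(reference.get(key) == val for key, val in sequence.items()):
--         return 0
--
--     try:
--         reference2 = {int(key): val for key, val in reference.items()}
--         sequence2 = {int(key): val for key, val in sequence.items()}
--     except ValueError:
--         return None
--
--     key0, val0 = next(iter(sequence2.items()))
--     positionsByType = {}
--     for pos, val in reference2.items():
--         positionsByType.setdefault(val, []).append(pos)
--
--     for offset in sorted(pos - key0 for pos in positionsByType.get(val0, [])):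
--         if all(reference2.get(key + offset) == val for key, val in sequence2.items()):
--             return offset
--
--     return None
-- ===== Notes on version B (the rewrite author's own statement) =====
-- stated objective: alternative
-- what changed: Instead of scanning every offset in [min(ref)-min(seq), max(ref)-max(seq)], B indexes reference positions by residue type and tries only the offsets (sorted ascending) that align the first sequence residue onto a same-type reference residue.
import Mathlib
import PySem

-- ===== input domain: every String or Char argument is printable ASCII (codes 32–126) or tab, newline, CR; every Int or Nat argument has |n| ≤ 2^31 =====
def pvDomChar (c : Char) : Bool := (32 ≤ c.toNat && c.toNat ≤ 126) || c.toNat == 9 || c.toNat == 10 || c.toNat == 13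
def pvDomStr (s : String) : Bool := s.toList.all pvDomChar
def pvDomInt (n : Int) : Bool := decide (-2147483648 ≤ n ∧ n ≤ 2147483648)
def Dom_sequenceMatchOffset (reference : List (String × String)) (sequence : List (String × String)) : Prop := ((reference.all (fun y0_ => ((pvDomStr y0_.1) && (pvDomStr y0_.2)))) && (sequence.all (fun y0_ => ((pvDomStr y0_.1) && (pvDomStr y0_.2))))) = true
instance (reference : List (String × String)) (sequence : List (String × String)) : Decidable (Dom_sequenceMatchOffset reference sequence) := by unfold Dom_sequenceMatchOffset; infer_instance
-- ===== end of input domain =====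

-- B replaces A's linear scan over every offset in [min(ref)-min(seq), max(ref)-max(seq)] by
-- trying only the offsets that align the first sequence residue onto a reference residue of the
-- same type (reference positions indexed by residue type, candidates sorted ascending).
-- Both ports receive the dicts as association lists and, like Python's OrderedDict, let a
-- duplicated key keep its first position with its last value (PySem.Dict.ofList).

-- `int(key)` over the items of a dict; `none` = the ValueError Python's `try` catches
def pvIntPairsA : List (String × String) → Option (List (Int × String))
  | [] => some []
  | (k, v) :: rest =>
    match PySem.Int.ofStr? k with
    | none => none
    | some i =>
      match pvIntPairsA rest with
      | none => none
      | some ps => some ((i, v) :: ps)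

-- ===== PORT A =====
-- note: A's `if None in reference.values() or None in sequence.values(): raise` can never fire
-- here, the values being strings (never None); it is therefore not ported.
def sequenceMatchOffset (reference : List (String × String)) (sequence : List (String × String)) : Option Int :=
  let ref := PySem.Dict.ofList reference
  let seq := PySem.Dict.ofList sequence
  if ref.items.isEmpty || seq.items.isEmpty then none
  else if seq.items.all (fun kv => ref.get? kv.1 == some kv.2) then some 0
  else
    match pvIntPairsA ref.items, pvIntPairsA seq.items with
    | some rp, some sp =>
      let ref2 := PySem.Dict.ofList rp
      let seq2 := PySem.Dict.ofList sp
      let minOffset := (PySem.List.min? ref2.keys id).getD 0 - (PySem.List.min? seq2.keys id).getD 0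
      let maxOffset := (PySem.List.max? ref2.keys id).getD 0 - (PySem.List.max? seq2.keys id).getD 0
      (PySem.List.pyRange minOffset (maxOffset + 1)).find?
        (fun o => seq2.items.all (fun kv => ref2.get? (kv.1 + o) == some kv.2))
    | _, _ => none

-- ===== PORT B =====
-- B's own copy of the `int(key)` conversion (the same identical code appears in both Pythons)
def pvIntPairsB (l : List (String × String)) : Option (List (Int × String)) :=
  match l with
  | [] => some []
  | (k, v) :: rest => do
      let i ← PySem.Int.ofStr? k
      let ps ← pvIntPairsB rest
      pure ((i, v) :: ps)

-- `positionsByType.setdefault(val, []).append(pos)` over the (pos, val) items, grouping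
-- reference positions by residue type
def pvIndexByType (items : List (Int × String)) : PySem.Dict String (List Int) :=
  (items.map (fun kv => (kv.2, kv.1))).foldl
    (fun d p => d.modify p.1 [] (fun l => l ++ [p.2])) PySem.Dict.empty

def sequenceMatchOffset_alt (reference : List (String × String)) (sequence : List (String × String)) : Option Int :=
  let ref := PySem.Dict.ofList reference
  let seq := PySem.Dict.ofList sequence
  if ref.items.isEmpty || seq.items.isEmpty then none
  else if seq.items.all (fun kv => ref.get? kv.1 == some kv.2) then some 0
  else
    match pvIntPairsB ref.items with
    | none => none
    | some rp =>
      match pvIntPairsB seq.items with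
      | none => none
      | some sp =>
        let ref2 := PySem.Dict.ofList rp
        let seq2 := PySem.Dict.ofList sp
        match seq2.items with
        | [] => none   -- unreachable: sequence is nonempty here (next(iter(...)) never raises)
        | (key0, val0) :: _ =>
          let cands := PySem.List.sorted
            (((pvIndexByType ref2.items).getD val0 []).map (fun p => p - key0)) id
          cands.find? (fun o => seq2.items.all (fun kv => ref2.get? (kv.1 + o) == some kv.2))

-- ===== PRECONDITION & SPEC =====
def Spec_sequenceMatchOffset (reference : List (String × String)) (sequence : List (String × String)) (out : Option Int) : Prop := out = sequenceMatchOffset_alt reference sequence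
instance (reference : List (String × String)) (sequence : List (String × String)) (out : Option Int) : Decidable (Spec_sequenceMatchOffset reference sequence out) := by unfold Spec_sequenceMatchOffset; infer_instance

-- ===== CLAIM (what is proved, stated in full; the proofs are below) =====
def Claim_equal_sequenceMatchOffset : Prop := ∀ (reference : List (String × String)) (sequence : List (String × String)), Dom_sequenceMatchOffset reference sequence → Spec_sequenceMatchOffset reference sequence (sequenceMatchOffset reference sequence)

-- ===== LEMMAS AND PROOFS =====

lemma pyRange_nil {a b : Int} (h : b ≤ a) : PySem.List.pyRange a b = [] :=
  List.eq_nil_iff_forall_not_mem.mpr fun x hx => by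
    have := PySem.List.mem_pyRange_one.mp hx; omega

lemma pyRange_pairwise (a b : Int) : (PySem.List.pyRange a b).Pairwise (· ≤ ·) := by
  obtain ⟨n, hn⟩ : ∃ n : Nat, b - a ≤ n := ⟨(b - a).toNat, Int.self_le_toNat _⟩
  induction n generalizing a with
  | zero => rw [pyRange_nil (by omega)]; exact List.Pairwise.nil
  | succ n ih =>
    by_cases h : a < b
    · rw [PySem.List.pyRange_one_cons h]
      exact List.Pairwise.cons
        (fun x hx => by have := (PySem.List.mem_pyRange_one.mp hx).1; omega)
        (ih (a + 1) (by omega))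
    · rw [pyRange_nil (by omega)]; exact List.Pairwise.nil

-- a sorted list returns the global minimum of P as its first P-element
lemma find?_min {P : Int → Bool} {l : List Int} (hp : l.Pairwise (· ≤ ·)) {m : Int}
    (hPm : P m = true) (hmem : m ∈ l) (hmin : ∀ x, P x = true → m ≤ x) :
    l.find? P = some m := by
  induction l with
  | nil => exact absurd hmem (List.not_mem_nil)
  | cons a t ih =>
    by_cases hPa : P a = true
    · have ham : a = m := by
        refine le_antisymm ?_ (hmin a hPa)
        rcases List.mem_cons.mp hmem with rfl | hmt
        · exact le_refl _
        · exact (List.pairwise_cons.mp hp).1 m hmt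
      rw [List.find?_cons_of_pos hPa, ham]
    · have hmt : m ∈ t := by
        rcases List.mem_cons.mp hmem with rfl | h
        · exact absurd hPm hPa
        · exact h
      rw [List.find?_cons_of_neg hPa]
      exact ih (List.pairwise_cons.mp hp).2 hmt

-- two ascending lists each containing every P-element find the same first P-element
lemma find?_sorted_eq {P : Int → Bool} {l1 l2 : List Int}
    (h1 : l1.Pairwise (· ≤ ·)) (h2 : l2.Pairwise (· ≤ ·))
    (c1 : ∀ o, P o = true → o ∈ l1) (c2 : ∀ o, P o = true → o ∈ l2) :
    l1.find? P = l2.find? P := by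
  by_cases hex : ∃ o, P o = true
  · obtain ⟨o, ho⟩ := hex
    have hf : l1.filter P ≠ [] := by
      intro h
      have := List.mem_filter.mpr ⟨c1 o ho, ho⟩
      rw [h] at this; exact absurd this (List.not_mem_nil)
    obtain ⟨m, t, hmt⟩ := List.exists_cons_of_ne_nil hf
    have hmf : m ∈ l1.filter P := by rw [hmt]; exact List.mem_cons_self
    have hPm : P m = true := (List.mem_filter.mp hmf).2
    have hmin : ∀ x, P x = true → m ≤ x := by
      intro x hx
      have hxf : x ∈ l1.filter P := List.mem_filter.mpr ⟨c1 x hx, hx⟩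
      have hpf : (l1.filter P).Pairwise (· ≤ ·) := h1.filter _
      rw [hmt] at hxf hpf
      rcases List.mem_cons.mp hxf with rfl | h
      · exact le_refl _
      · exact (List.pairwise_cons.mp hpf).1 x h
    rw [find?_min h1 hPm (List.mem_filter.mp hmf).1 hmin,
        find?_min h2 hPm (c2 m hPm) hmin]
  · push Not at hex
    rw [List.find?_eq_none.mpr fun x _ => by simpa using hex x,
        List.find?_eq_none.mpr fun x _ => by simpa using hex x]

lemma foldl_insert_items_ne_nil :
    ∀ (ps : List (Int × String)) (d : PySem.Dict Int String),
      d.items ≠ [] ∨ ps ≠ [] →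
      ((ps.foldl (fun d p => d.insert p.1 p.2) d).items ≠ []) := by
  intro ps
  induction ps with
  | nil => intro d h; simpa using h.resolve_right (by simp)
  | cons p t ih =>
    intro d _
    rw [List.foldl_cons]
    refine ih _ (Or.inl ?_)
    rw [PySem.Dict.items_insert]
    split_ifs with hc
    · intro h
      rw [List.map_eq_nil_iff] at h
      have : p.1 ∈ d.keys := (PySem.Dict.contains_iff_mem_keys _ _).mp hc
      rw [show d.keys = d.items.map Prod.fst from rfl, h] at this
      exact absurd this (List.not_mem_nil)
    · simp

lemma ofList_items_ne_nil {ps : List (Int × String)} (h : ps ≠ []) :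
    (PySem.Dict.ofList ps).items ≠ [] :=
  foldl_insert_items_ne_nil ps PySem.Dict.empty (Or.inr h)

lemma pvIntPairsA_ne_nil {l : List (String × String)} {ps : List (Int × String)}
    (h : pvIntPairsA l = some ps) (hl : l ≠ []) : ps ≠ [] := by
  match l with
  | [] => exact absurd rfl hl
  | (k, v) :: rest =>
    simp only [pvIntPairsA] at h
    rcases hk : PySem.Int.ofStr? k with _ | i <;> rw [hk] at h
    · exact absurd h (by simp)
    · rcases hr : pvIntPairsA rest with _ | ps' <;> rw [hr] at h
      · exact absurd h (by simp)
      · simp only [Option.some.injEq] at h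
        rw [← h]; simp

lemma min?_foldl_isSome (f : Option Int → Int → Option Int)
    (hf : ∀ m x, (f (some m) x).isSome) :
    ∀ (l : List Int) (m : Int), (l.foldl f (some m)).isSome := by
  intro l
  induction l with
  | nil => intro m; simp
  | cons x t ih =>
    intro m
    rw [List.foldl_cons]
    obtain ⟨m', hm'⟩ := Option.isSome_iff_exists.mp (hf m x)
    rw [hm']
    exact ih m'

lemma min?_isSome_of_ne_nil {l : List Int} (h : l ≠ []) : (PySem.List.min? l id).isSome := by
  match l with
  | x :: t =>
    unfold PySem.List.min?
    rw [List.foldl_cons]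
    exact min?_foldl_isSome _ (fun m y => by dsimp only; split <;> rfl) t x

lemma max?_isSome_of_ne_nil {l : List Int} (h : l ≠ []) : (PySem.List.max? l id).isSome := by
  match l with
  | x :: t =>
    unfold PySem.List.max?
    rw [List.foldl_cons]
    exact min?_foldl_isSome _ (fun m y => by dsimp only; split <;> rfl) t x

lemma mem_keys_of_match (ref2 : PySem.Dict Int String) (o : Int) {k : Int} {v : String}
    (hget : ref2.get? (k + o) = some v) : k + o ∈ ref2.keys := by
  by_contra h
  rw [(PySem.Dict.get?_eq_none_iff_not_mem_keys ref2 (k + o)).mpr h] at hget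
  simp at hget

lemma exists_pair_of_mem_keys (d : PySem.Dict Int String) {k : Int} (h : k ∈ d.keys) :
    ∃ v, (k, v) ∈ d.items := by
  obtain ⟨kv, hkv, hfst⟩ := List.mem_map.mp h
  exact ⟨kv.2, by rw [← hfst]; exact hkv⟩

-- every full match lies in A's scanned range [minOffset, maxOffset]
lemma mem_range_of_match (ref2 seq2 : PySem.Dict Int String) (hs : seq2.items ≠ []) (o : Int)
    (hP : (seq2.items.all (fun kv => ref2.get? (kv.1 + o) == some kv.2)) = true) :
    o ∈ PySem.List.pyRange
        ((PySem.List.min? ref2.keys id).getD 0 - (PySem.List.min? seq2.keys id).getD 0)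
        ((PySem.List.max? ref2.keys id).getD 0 - (PySem.List.max? seq2.keys id).getD 0 + 1) := by
  have hks : seq2.keys ≠ [] := fun h => hs (List.map_eq_nil_iff.mp h)
  obtain ⟨mS, hmS⟩ := Option.isSome_iff_exists.mp (min?_isSome_of_ne_nil hks)
  obtain ⟨MS, hMS⟩ := Option.isSome_iff_exists.mp (max?_isSome_of_ne_nil hks)
  obtain ⟨vm, hvm⟩ := exists_pair_of_mem_keys seq2 (PySem.List.min?_mem hmS)
  obtain ⟨vM, hvM⟩ := exists_pair_of_mem_keys seq2 (PySem.List.max?_mem hMS)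
  have hgm := List.all_eq_true.mp hP (mS, vm) hvm
  have hgM := List.all_eq_true.mp hP (MS, vM) hvM
  simp only [beq_iff_eq] at hgm hgM
  have hmem_m : mS + o ∈ ref2.keys := mem_keys_of_match ref2 o hgm
  have hmem_M : MS + o ∈ ref2.keys := mem_keys_of_match ref2 o hgM
  have hkr : ref2.keys ≠ [] := fun h => by rw [h] at hmem_m; exact absurd hmem_m (List.not_mem_nil)
  obtain ⟨mR, hmR⟩ := Option.isSome_iff_exists.mp (min?_isSome_of_ne_nil hkr)
  obtain ⟨MR, hMR⟩ := Option.isSome_iff_exists.mp (max?_isSome_of_ne_nil hkr)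
  have h1 : mR ≤ mS + o := PySem.List.min?_isMin hmR _ hmem_m
  have h2 : MS + o ≤ MR := PySem.List.max?_isMax hMR _ hmem_M
  rw [PySem.List.mem_pyRange_one, hmS, hMS, hmR, hMR]
  simp only [Option.getD_some]
  omega

-- every full match is among B's anchored candidates
lemma mem_cands_of_match (ref2 : PySem.Dict Int String) (hnd : ref2.keys.Nodup)
    (key0 val0 : _) (o : Int) (hget : ref2.get? (key0 + o) = some val0) :
    o ∈ ((pvIndexByType ref2.items).getD val0 []).map (fun p => p - key0) := by
  have hmem : (key0 + o, val0) ∈ ref2.items :=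
    (PySem.Dict.get?_eq_some_iff_mem_items ref2 _ _ hnd).mp hget
  have hidx : (pvIndexByType ref2.items).getD val0 []
      = ((ref2.items.map (fun kv => (kv.2, kv.1))).filter (fun p => p.1 == val0)).map (·.2) := by
    unfold pvIndexByType
    rw [PySem.Dict.getD_foldl_modify_append]
    simp
  rw [hidx]
  refine List.mem_map.mpr ⟨key0 + o, ?_, by ring⟩
  refine List.mem_map.mpr ⟨(val0, key0 + o), ?_, rfl⟩
  refine List.mem_filter.mpr ⟨?_, by simp⟩
  exact List.mem_map.mpr ⟨(key0 + o, val0), hmem, rfl⟩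

lemma pvIntPairsB_eq (l : List (String × String)) : pvIntPairsB l = pvIntPairsA l := by
  induction l with
  | nil => rfl
  | cons p rest ih =>
    obtain ⟨k, v⟩ := p
    rw [pvIntPairsB, pvIntPairsA]
    rcases PySem.Int.ofStr? k with _ | i
    · rfl
    · dsimp only; rw [ih]
      rcases pvIntPairsA rest with _ | ps <;> rfl

-- ===== VERDICT (by name: the statement is the Claim_ definition above) =====
theorem sequenceMatchOffset_spec : Claim_equal_sequenceMatchOffset := by
  intro reference sequence _
  unfold Spec_sequenceMatchOffset
  simp only [sequenceMatchOffset, sequenceMatchOffset_alt]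
  by_cases h1 : ((PySem.Dict.ofList reference).items.isEmpty || (PySem.Dict.ofList sequence).items.isEmpty) = true
  · rw [if_pos h1, if_pos h1]
  · rw [if_neg h1, if_neg h1]
    by_cases h2 : ((PySem.Dict.ofList sequence).items.all
        (fun kv => (PySem.Dict.ofList reference).get? kv.1 == some kv.2)) = true
    · rw [if_pos h2, if_pos h2]
    · rw [if_neg h2, if_neg h2]
      simp only [pvIntPairsB_eq]
      rcases hr : pvIntPairsA (PySem.Dict.ofList reference).items with _ | rp <;>
        rcases hs : pvIntPairsA (PySem.Dict.ofList sequence).items with _ | sp <;>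
          dsimp only
      -- main branch: both convert; A scans the offset range, B scans the anchored candidates
      have hseqne : (PySem.Dict.ofList sequence).items ≠ [] := fun h => h1 (by simp [h])
      have hspne : sp ≠ [] := pvIntPairsA_ne_nil hs hseqne
      have hsne : (PySem.Dict.ofList sp).items ≠ [] := ofList_items_ne_nil hspne
      obtain ⟨p0, rest, hitems⟩ := List.exists_cons_of_ne_nil hsne
      obtain ⟨key0, val0⟩ := p0
      simp only [hitems]
      refine find?_sorted_eq (pyRange_pairwise _ _) (PySem.List.sorted_pairwise _ _) ?_ ?_
      · intro o hPo
        exact mem_range_of_match (PySem.Dict.ofList rp) (PySem.Dict.ofList sp) hsne o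
          (by rw [hitems]; exact hPo)
      · intro o hPo
        refine (PySem.List.sorted_perm _ _ _).mem_iff.mpr ?_
        have hPo' := hPo
        rw [List.all_cons, Bool.and_eq_true] at hPo'
        have hhead := hPo'.1
        simp only [beq_iff_eq] at hhead
        exact mem_cands_of_match (PySem.Dict.ofList rp) (PySem.Dict.nodup_keys_ofList rp)
          key0 val0 o hhead
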